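-- pv_equiv track=rewrite | github.com/Arskan17/Efficient-algorithms-for-checking-equivalence-of-compressed-strings | app.py | simple_compact
-- ===== SOURCE A (Python) =====
-- from math import gcd # https://docs.python.org/3/library/math.html#math.gcd
--
-- def simple_compact(values, w_A):
--     if len(values) < 3:
--         return values # SimpleCompact fails given that there are fewer than 3 triples
--
--     i, j, k = values[0], values[1], values[2]
--     if (j - i) + (k - i) <= w_A - i:
--         g = gcd(j - i, k - i)
--         # new_values = [i, i + g] + values[3:]
--         return simple_compact(([i, i + g] + values[3:]), w_A)  # Recursively apply to the new list
--
--     elif (j - i) + (k - i) > w_A - i: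
--         return values
-- ===== SOURCE B (Python) =====
-- from math import gcd
--
-- def simple_compact(values, w_A):
--     if len(values) < 3:
--         return values
--     i, j, k = values[0], values[1], values[2]
--     if (j - i) + (k - i) > w_A - i:
--         return values
--     g = gcd(j - i, k - i)
--     m = 3
--     n = len(values)
--     while m < n and g + (values[m] - i) <= w_A - i:
--         g = gcd(g, values[m] - i)
--         m += 1
--     return [i, i + g] + values[m:]
-- ===== Notes on version B (the rewrite author's own statement) =====
-- stated objective: faster
-- what changed: Replaces A's recursion, which rebuilds the whole list ([i,i+g]+values[3:]) at every gcd-folding step, with a single left-to-right pass that keeps the fixed head i and a running gcd g over an index, slicing the untouched tail exactly once at the end.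
import Mathlib
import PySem

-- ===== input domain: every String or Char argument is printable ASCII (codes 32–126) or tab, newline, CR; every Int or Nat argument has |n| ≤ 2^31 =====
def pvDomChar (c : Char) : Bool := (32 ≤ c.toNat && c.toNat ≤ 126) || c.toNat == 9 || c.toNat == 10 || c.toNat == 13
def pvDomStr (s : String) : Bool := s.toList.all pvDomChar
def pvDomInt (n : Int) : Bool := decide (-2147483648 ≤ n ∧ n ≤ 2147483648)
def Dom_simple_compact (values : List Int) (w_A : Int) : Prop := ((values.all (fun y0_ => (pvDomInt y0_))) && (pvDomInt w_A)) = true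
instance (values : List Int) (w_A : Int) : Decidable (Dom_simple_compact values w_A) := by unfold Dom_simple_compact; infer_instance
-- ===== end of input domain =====

-- B replaces A's list-rebuilding recursion by one linear pass with a running gcd (faster; same return value).

-- ===== PORT A =====
-- Literal port of A: recurse on [i, i+g] ++ values[3:] while the condition holds.
-- math.gcd on ints = Int.gcd (nonnegative), cast back to Int.
def simple_compact (values : List Int) (w_A : Int) : List Int :=
  match values with
  | i :: j :: k :: rest =>
      if (j - i) + (k - i) ≤ w_A - i then
        simple_compact (i :: (i + (Int.gcd (j - i) (k - i) : Int)) :: rest) w_A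
      else values
  | l => l
termination_by values.length
decreasing_by simp

-- ===== PORT B =====
-- Source B's while loop over the remaining suffix, carrying the running gcd g; returns (final g, untouched tail).
def scLoop (i w_A g : Int) (rest : List Int) : Int × List Int :=
  match rest with
  | [] => (g, [])
  | v :: rs =>
      if g + (v - i) ≤ w_A - i then scLoop i w_A (Int.gcd g (v - i) : Int) rs
      else (g, v :: rs)

def simple_compact_alt (values : List Int) (w_A : Int) : List Int :=
  match values with
  | [] => []
  | [x] => [x]
  | [x, y] => [x, y]
  | i :: j :: k :: rest =>
      if (j - i) + (k - i) > w_A - i then values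
      else
        let p := scLoop i w_A (Int.gcd (j - i) (k - i) : Int) rest
        i :: (i + p.1) :: p.2

-- ===== PRECONDITION & SPEC =====
def Spec_simple_compact (values : List Int) (w_A : Int) (out : List Int) : Prop := out = simple_compact_alt values w_A
instance (values : List Int) (w_A : Int) (out : List Int) : Decidable (Spec_simple_compact values w_A out) := by unfold Spec_simple_compact; infer_instance

-- ===== CLAIM (what is proved, stated in full; the proofs are below) =====
def Claim_equal_simple_compact : Prop := ∀ (values : List Int) (w_A : Int), Dom_simple_compact values w_A → Spec_simple_compact values w_A (simple_compact values w_A)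

-- ===== LEMMAS AND PROOFS =====
lemma simple_compact_loop (rest : List Int) : ∀ (i w_A g : Int),
    simple_compact (i :: (i + g) :: rest) w_A =
      i :: (i + (scLoop i w_A g rest).1) :: (scLoop i w_A g rest).2 := by
  induction rest with
  | nil => intro i w_A g; rw [simple_compact.eq_def]; simp [scLoop]
  | cons v rs ih =>
      intro i w_A g
      rw [simple_compact.eq_def, scLoop]
      have h : (i + g) - i = g := by ring
      by_cases hc : g + (v - i) ≤ w_A - i
      · simp only [h, if_pos hc]
        exact ih i w_A (Int.gcd g (v - i) : Int)
      · simp only [h, if_neg hc]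

theorem simple_compact_spec : Claim_equal_simple_compact := by
  intro values w_A _
  unfold Spec_simple_compact
  match values with
  | [] => rw [simple_compact.eq_def]; rfl
  | [a] => rw [simple_compact.eq_def]; rfl
  | [a, b] => rw [simple_compact.eq_def]; rfl
  | i :: j :: k :: rest =>
      rw [simple_compact.eq_def, simple_compact_alt]
      dsimp only
      by_cases hc : (j - i) + (k - i) ≤ w_A - i
      · rw [if_pos hc, if_neg (by omega)]
        have := simple_compact_loop rest i w_A (Int.gcd (j - i) (k - i) : Int)
        simpa using this
      · rw [if_neg hc, if_pos (by omega)]
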